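-- pv_equiv track=rewrite | github.com/kownse/qlib-proj | scripts/models/analysis/factor_stability.py | categorize_factor
-- ===== SOURCE A (Python) =====
-- def categorize_factor(name):
--     """将因子分类"""
--     name_str = str(name).lower()
--     if name_str.startswith('macro_'):
--         if 'vix' in name_str or 'uvxy' in name_str or 'svxy' in name_str:
--             return 'Macro-VIX'
--         elif any(s in name_str for s in ['xlk', 'xlf', 'xle', 'xlv', 'xli', 'xlp', 'xly', 'xlu', 'xlre', 'xlb', 'xlc']):
--             return 'Macro-Sector'
--         elif any(s in name_str for s in ['yield', 'spread', 'credit', 'hy_', 'ig_']):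
--             return 'Macro-Rates'
--         else:
--             return 'Macro-Other'
--     elif 'talib' in name_str:
--         return 'TA-Lib'
--     else:
--         return 'Alpha158'
-- ===== SOURCE B (Python) =====
-- _KEYWORD_PRIORITY = {
--     'vix': 0, 'uvxy': 0, 'svxy': 0,
--     'xlk': 1, 'xlf': 1, 'xle': 1, 'xlv': 1, 'xli': 1, 'xlp': 1,
--     'xly': 1, 'xlu': 1, 'xlre': 1, 'xlb': 1, 'xlc': 1,
--     'yield': 2, 'spread': 2, 'credit': 2, 'hy_': 2, 'ig_': 2,
-- }
-- _CATEGORIES = ('Macro-VIX', 'Macro-Sector', 'Macro-Rates', 'Macro-Other')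
--
--
-- def categorize_factor(name):
--     s = str(name).lower()
--     if not s.startswith('macro_'):
--         return 'TA-Lib' if 'talib' in s else 'Alpha158'
--     # hand-rolled multi-pattern scan: walk the text once, lowering the best
--     # (minimum) priority whenever some keyword starts at the current position
--     best = 3
--     for i in range(len(s)):
--         for kw, pri in _KEYWORD_PRIORITY.items():
--             if pri < best and s.startswith(kw, i):
--                 best = pri
--     return _CATEGORIES[best]
-- ===== Notes on version B (the rewrite author's own statement) =====
-- stated objective: alternative
-- what changed: Replaced the branch cascade of whole-string substring tests with a hand-rolled multi-pattern scan: a flat keyword-to-priority dict, one walk over the text positions testing startswith at each offset while accumulating the minimum priority, and a final category-table lookup by that priority.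
import Mathlib
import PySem

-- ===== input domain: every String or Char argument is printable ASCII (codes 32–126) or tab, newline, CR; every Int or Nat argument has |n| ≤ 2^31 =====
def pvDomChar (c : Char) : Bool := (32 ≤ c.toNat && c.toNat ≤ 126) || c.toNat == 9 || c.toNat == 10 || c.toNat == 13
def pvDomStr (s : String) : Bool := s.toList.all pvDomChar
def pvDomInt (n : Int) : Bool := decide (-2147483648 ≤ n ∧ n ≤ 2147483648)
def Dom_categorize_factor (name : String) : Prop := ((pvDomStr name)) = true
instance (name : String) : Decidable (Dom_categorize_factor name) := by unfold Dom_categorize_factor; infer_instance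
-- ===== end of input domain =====

-- B replaces A's branch cascade of substring tests by a single walk over the text
-- positions with a flat keyword→priority dict, accumulating the minimum matched
-- priority and indexing a category table (alternative algorithm, same cost).

-- ===== PORT A =====
def categorize_factor (name : String) : String :=
  let name_str := PySem.Str.lower name
  if PySem.Str.startswith name_str "macro_" then
    if PySem.Str.isIn "vix" name_str || PySem.Str.isIn "uvxy" name_str || PySem.Str.isIn "svxy" name_str then
      "Macro-VIX"
    else if (["xlk", "xlf", "xle", "xlv", "xli", "xlp", "xly", "xlu", "xlre", "xlb", "xlc"].any
        (fun s => PySem.Str.isIn s name_str)) then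
      "Macro-Sector"
    else if (["yield", "spread", "credit", "hy_", "ig_"].any
        (fun s => PySem.Str.isIn s name_str)) then
      "Macro-Rates"
    else
      "Macro-Other"
  else if PySem.Str.isIn "talib" name_str then
    "TA-Lib"
  else
    "Alpha158"

-- ===== PORT B =====
-- the flat keyword → priority dict of Source B, in insertion order
def kwPriority : List (List Char × Nat) :=
  [ ("vix".toList, 0), ("uvxy".toList, 0), ("svxy".toList, 0),
    ("xlk".toList, 1), ("xlf".toList, 1), ("xle".toList, 1), ("xlv".toList, 1),
    ("xli".toList, 1), ("xlp".toList, 1), ("xly".toList, 1), ("xlu".toList, 1),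
    ("xlre".toList, 1), ("xlb".toList, 1), ("xlc".toList, 1),
    ("yield".toList, 2), ("spread".toList, 2), ("credit".toList, 2),
    ("hy_".toList, 2), ("ig_".toList, 2) ]

def pvCategories : List String := ["Macro-VIX", "Macro-Sector", "Macro-Rates", "Macro-Other"]

-- the position-scan loop of Source B; Python's s.startswith(kw, i) is ported by hand as
-- startswith on s.drop i (exact, since i ranges over 0 ≤ i < len(s))
def pvBest (s : List Char) : Nat :=
  (List.range s.length).foldl
    (fun b i => kwPriority.foldl
      (fun b p => if p.2 < b ∧ PySem.Chars.startswith (s.drop i) p.1 then p.2 else b) b) 3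

def categorize_factor_alt (name : String) : String :=
  let s := PySem.Chars.lower name.toList
  if PySem.Chars.startswith s "macro_".toList then
    pvCategories.getD (pvBest s) "Macro-Other"
  else if PySem.Chars.isIn "talib".toList s then "TA-Lib" else "Alpha158"

-- ===== PRECONDITION & SPEC =====
def Spec_categorize_factor (name : String) (out : String) : Prop := out = categorize_factor_alt name
instance (name : String) (out : String) : Decidable (Spec_categorize_factor name out) := by unfold Spec_categorize_factor; infer_instance

-- ===== CLAIM (what is proved, stated in full; the proofs are below) =====
def Claim_equal_categorize_factor : Prop := ∀ (name : String), Dom_categorize_factor name → Spec_categorize_factor name (categorize_factor name)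

-- ===== LEMMAS AND PROOFS =====

-- generic facts about the min-accumulating fold
theorem pvFold_le_init {α : Type} (v : α → Nat) (m : α → Prop) [DecidablePred m]
    (l : List α) (b : Nat) :
    l.foldl (fun b x => if v x < b ∧ m x then v x else b) b ≤ b := by
  induction l generalizing b with
  | nil => simp
  | cons x l ih =>
      simp only [List.foldl_cons]
      split_ifs with h
      · exact le_trans (ih _) (le_of_lt h.1)
      · exact ih b

theorem pvFold_le_mem {α : Type} (v : α → Nat) (m : α → Prop) [DecidablePred m]
    (l : List α) (b : Nat) (x : α) (hx : x ∈ l) (hm : m x) :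
    l.foldl (fun b x => if v x < b ∧ m x then v x else b) b ≤ v x := by
  induction l generalizing b with
  | nil => cases hx
  | cons y l ih =>
      simp only [List.foldl_cons]
      rcases List.mem_cons.1 hx with rfl | hx'
      · split_ifs with h
        · exact pvFold_le_init v m l (v x)
        · rcases not_and_or.1 h with h1 | h2
          · exact le_trans (pvFold_le_init v m l b) (not_lt.1 h1)
          · exact absurd hm h2
      · exact ih _ hx'

theorem pvLe_fold {α : Type} (v : α → Nat) (m : α → Prop) [DecidablePred m]
    (l : List α) (b c : Nat) (hc : c ≤ b) (h : ∀ x ∈ l, m x → c ≤ v x) :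
    c ≤ l.foldl (fun b x => if v x < b ∧ m x then v x else b) b := by
  induction l generalizing b with
  | nil => simpa using hc
  | cons x l ih =>
      simp only [List.foldl_cons]
      split_ifs with hcond
      · exact ih _ (h x (List.mem_cons_self) hcond.2) (fun y hy => h y (List.mem_cons_of_mem _ hy))
      · exact ih b hc (fun y hy => h y (List.mem_cons_of_mem _ hy))

-- the flattened pair list the double fold runs over
def pvPairs (s : List Char) : List (Nat × (List Char × Nat)) :=
  ((List.range s.length).map (fun i => kwPriority.map (fun p => (i, p)))).flatten

theorem pvBest_eq_pairsFold (s : List Char) :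
    pvBest s = (pvPairs s).foldl
      (fun b x => if x.2.2 < b ∧ PySem.Chars.startswith (s.drop x.1) x.2.1 then x.2.2 else b) 3 := by
  simp [pvBest, pvPairs, List.foldl_flatten, List.foldl_map]

theorem pv_mem_pairs {s : List Char} {i : Nat} {p : List Char × Nat}
    (hi : i < s.length) (hp : p ∈ kwPriority) : (i, p) ∈ pvPairs s := by
  simp only [pvPairs, List.mem_flatten, List.mem_map]
  refine ⟨kwPriority.map (fun p => (i, p)), ⟨i, by simpa using hi, rfl⟩, ?_⟩
  simp only [List.mem_map]
  exact ⟨p, hp, rfl⟩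

-- occurrence of a keyword somewhere in s ↔ a prefix match at some in-range position
theorem pv_occ_iff {s kw : List Char} (hkw : kw ≠ []) :
    PySem.Chars.isIn kw s = true ↔
      ∃ i, i < s.length ∧ PySem.Chars.startswith (s.drop i) kw = true := by
  rw [← PySem.Chars.exists_prefix_drop_iff_isIn]
  constructor
  · rintro ⟨j, hj⟩
    refine ⟨j, ?_, (PySem.Chars.startswith_iff _ _).2 hj⟩
    by_contra h
    have : s.drop j = [] := List.drop_eq_nil_of_le (not_lt.1 h)
    rw [this] at hj
    exact hkw (List.prefix_nil.1 hj)
  · rintro ⟨i, _, hst⟩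
    exact ⟨i, (PySem.Chars.startswith_iff _ _).1 hst⟩

theorem pv_kw_ne_nil : ∀ p ∈ kwPriority, p.1 ≠ [] := by decide

-- upper bound: a keyword of the dict occurring in s caps pvBest by its priority
theorem pvBest_le {s : List Char} {kw : List Char} {c : Nat}
    (hmem : (kw, c) ∈ kwPriority) (hocc : PySem.Chars.isIn kw s = true) :
    pvBest s ≤ c := by
  obtain ⟨i, hi, hst⟩ := (pv_occ_iff (pv_kw_ne_nil _ hmem)).1 hocc
  rw [pvBest_eq_pairsFold]
  exact pvFold_le_mem _ _ _ _ ((i, (kw, c))) (pv_mem_pairs hi hmem) hst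

theorem pv_mem_pairs_elim {s : List Char} {i : Nat} {p : List Char × Nat}
    (hx : (i, p) ∈ pvPairs s) : i < s.length ∧ p ∈ kwPriority := by
  simp only [pvPairs, List.mem_flatten, List.mem_map] at hx
  obtain ⟨_, ⟨j, hj, rfl⟩, hx⟩ := hx
  simp only [List.mem_map, Prod.mk.injEq] at hx
  obtain ⟨q, hq, hij, hqp⟩ := hx
  exact ⟨hij ▸ (List.mem_range.1 hj), hqp ▸ hq⟩

-- lower bound: if every occurring keyword has priority ≥ c (c ≤ 3), then c ≤ pvBest
theorem pvLe_best {s : List Char} {c : Nat} (hc : c ≤ 3)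
    (h : ∀ kw pr, (kw, pr) ∈ kwPriority → PySem.Chars.isIn kw s = true → c ≤ pr) :
    c ≤ pvBest s := by
  rw [pvBest_eq_pairsFold]
  refine pvLe_fold _ _ _ _ _ hc ?_
  rintro ⟨i, kw, pr⟩ hx hm
  obtain ⟨hi, hp⟩ := pv_mem_pairs_elim hx
  exact h kw pr hp ((pv_occ_iff (pv_kw_ne_nil _ hp)).2 ⟨i, hi, hm⟩)

-- the three keyword groups of A, as string lists (proof-side only)
def pvG0 : List String := ["vix", "uvxy", "svxy"]
def pvG1 : List String := ["xlk", "xlf", "xle", "xlv", "xli", "xlp", "xly", "xlu", "xlre", "xlb", "xlc"]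
def pvG2 : List String := ["yield", "spread", "credit", "hy_", "ig_"]

theorem pv_hm1 : ∀ t ∈ pvG1, (t.toList, (1:Nat)) ∈ kwPriority := by decide
theorem pv_hm2 : ∀ t ∈ pvG2, (t.toList, (2:Nat)) ∈ kwPriority := by decide
theorem pv_cov1 : ∀ p ∈ kwPriority, (∃ t ∈ pvG0, p.1 = t.toList) ∨ 1 ≤ p.2 := by decide
theorem pv_cov2 : ∀ p ∈ kwPriority, (∃ t ∈ pvG0 ++ pvG1, p.1 = t.toList) ∨ 2 ≤ p.2 := by decide
theorem pv_cov3 : ∀ p ∈ kwPriority, ∃ t ∈ pvG0 ++ pvG1 ++ pvG2, p.1 = t.toList := by decide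

-- ===== VERDICT (by name: the statement is the Claim_ definition above) =====
theorem categorize_factor_spec : Claim_equal_categorize_factor := by
  intro name _
  unfold Spec_categorize_factor categorize_factor categorize_factor_alt
  simp only [PySem.Str.startswith_eq, PySem.Str.isIn_eq, PySem.Str.toList_lower]
  set s := PySem.Chars.lower name.toList with hs
  by_cases hM : PySem.Chars.startswith s "macro_".toList = true
  · rw [if_pos hM, if_pos hM]
    by_cases h0 : (PySem.Chars.isIn "vix".toList s || PySem.Chars.isIn "uvxy".toList s ||
        PySem.Chars.isIn "svxy".toList s) = true
    · have hb : pvBest s = 0 := by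
        have hle : pvBest s ≤ 0 := by
          simp only [Bool.or_eq_true] at h0
          rcases h0 with (h | h) | h
          · exact pvBest_le (by decide) h
          · exact pvBest_le (by decide) h
          · exact pvBest_le (by decide) h
        omega
      rw [if_pos h0, hb]
      rfl
    · have h0' : ∀ t ∈ pvG0, ¬ PySem.Chars.isIn t.toList s = true := by
        simp only [Bool.or_eq_true, not_or] at h0
        intro t ht
        fin_cases ht <;> tauto
      rw [if_neg h0]
      by_cases h1 : (["xlk", "xlf", "xle", "xlv", "xli", "xlp", "xly", "xlu", "xlre", "xlb",
          "xlc"].any (fun t => PySem.Chars.isIn t.toList s)) = true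
      · have hb : pvBest s = 1 := by
          obtain ⟨t, ht, hocc⟩ := List.any_eq_true.1 h1
          have hle : pvBest s ≤ 1 := pvBest_le (pv_hm1 t ht) hocc
          have hge : 1 ≤ pvBest s := by
            refine pvLe_best (by omega) ?_
            intro kw pr hmem hocc'
            rcases pv_cov1 (kw, pr) hmem with ⟨u, hu, hequ⟩ | hpr
            · exact absurd hocc' (by
                rw [show kw = u.toList from hequ] at hocc' ⊢
                exact h0' u hu)
            · exact hpr
          omega
        rw [if_pos h1, hb]
        rfl
      · have h1' : ∀ t ∈ pvG1, ¬ PySem.Chars.isIn t.toList s = true := by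
          intro t ht h
          exact h1 (List.any_eq_true.2 ⟨t, ht, h⟩)
        rw [if_neg h1]
        by_cases h2 : (["yield", "spread", "credit", "hy_",
            "ig_"].any (fun t => PySem.Chars.isIn t.toList s)) = true
        · have hb : pvBest s = 2 := by
            obtain ⟨t, ht, hocc⟩ := List.any_eq_true.1 h2
            have hle : pvBest s ≤ 2 := pvBest_le (pv_hm2 t ht) hocc
            have hge : 2 ≤ pvBest s := by
              refine pvLe_best (by omega) ?_
              intro kw pr hmem hocc'
              rcases pv_cov2 (kw, pr) hmem with ⟨u, hu, hequ⟩ | hpr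
              · rw [show kw = u.toList from hequ] at hocc'
                rcases List.mem_append.1 hu with hu0 | hu1
                · exact absurd hocc' (h0' u hu0)
                · exact absurd hocc' (h1' u hu1)
              · exact hpr
            omega
          rw [if_pos h2, hb]
          rfl
        · have h2' : ∀ t ∈ pvG2, ¬ PySem.Chars.isIn t.toList s = true := by
            intro t ht h
            exact h2 (List.any_eq_true.2 ⟨t, ht, h⟩)
          have hb : pvBest s = 3 := by
            have hle : pvBest s ≤ 3 := by
              rw [pvBest_eq_pairsFold]; exact pvFold_le_init _ _ _ _
            have hge : 3 ≤ pvBest s := by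
              refine pvLe_best (by omega) ?_
              intro kw pr hmem hocc'
              obtain ⟨u, hu, hequ⟩ := pv_cov3 (kw, pr) hmem
              rw [show kw = u.toList from hequ] at hocc'
              rcases List.mem_append.1 hu with hu01 | hu2
              · rcases List.mem_append.1 hu01 with hu0 | hu1
                · exact absurd hocc' (h0' u hu0)
                · exact absurd hocc' (h1' u hu1)
              · exact absurd hocc' (h2' u hu2)
            omega
          rw [if_neg h2, hb]
          rfl
  · rw [if_neg hM, if_neg hM]
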